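-- pv_equiv track=rewrite | github.com/michaelIf/likou | 排序/数组中的k个最强值.py | getStrongest
-- ===== SOURCE A (Python) =====
-- def getStrongest(arr, k):
--     arr.sort()
--     res = {}
--     m_index = (len(arr)-1)/2
--     m = arr[int(m_index)]
--     for j, x in enumerate(arr):
--         res[j] = abs(m-x)
--     res_dict = sorted(res.items(), key=lambda y: (-y[1], -y[0]))
--     ans = []
--     for n in range(k):
--         ans.append(arr[res_dict[n][0]])
--     return ans
--
-- arr = [-7,22,17,3]
--
-- k = 2
-- ===== SOURCE B (Python) =====
-- def getStrongest(arr, k):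
--     arr.sort()
--     m = arr[(len(arr) - 1) // 2]
--     l, r = 0, len(arr) - 1
--     ans = []
--     for _ in range(k):
--         if m - arr[l] > arr[r] - m:
--             ans.append(arr[l])
--             l += 1
--         else:
--             ans.append(arr[r])
--             r -= 1
--     return ans
-- ===== Notes on version B (the rewrite author's own statement) =====
-- stated objective: faster
-- what changed: B replaces A's dictionary of distances plus a second full O(n log n) sort of all (index,distance) items by a two-pointer scan from both ends of the sorted array that picks the larger-distance end (right end on ties) k times.
-- outside the precondition, e.g. on getStrongest([], 1): A raises IndexError, B raises IndexError; on getStrongest([1, 2, 3], 4): A raises IndexError, B returns [3, 1, 2, 2]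
import Mathlib
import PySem

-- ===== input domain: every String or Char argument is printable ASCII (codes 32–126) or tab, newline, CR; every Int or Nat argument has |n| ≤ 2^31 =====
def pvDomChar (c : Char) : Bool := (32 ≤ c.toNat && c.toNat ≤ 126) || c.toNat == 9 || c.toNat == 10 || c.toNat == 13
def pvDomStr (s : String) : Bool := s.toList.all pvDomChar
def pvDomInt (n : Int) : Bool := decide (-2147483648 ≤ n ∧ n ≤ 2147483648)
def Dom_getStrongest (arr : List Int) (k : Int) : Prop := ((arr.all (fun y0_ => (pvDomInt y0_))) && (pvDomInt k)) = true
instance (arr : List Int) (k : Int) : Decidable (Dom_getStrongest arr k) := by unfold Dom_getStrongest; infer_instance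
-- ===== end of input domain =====

-- B replaces A's distance dictionary + second full sort by a two-pointer scan over the
-- sorted array (objective: faster, O(n log n + k) after the sort instead of two sorts).
-- Both A and B sort `arr` in place in Python; the theorems below are about the return value.

-- ===== PORT A =====
-- `int((len(arr)-1)/2)` is true division then int(): exactly truncating division (exact: |n| < 2^53).
def getStrongest (arr : List Int) (k : Int) : List Int :=
  let arr2 := PySem.List.sorted arr (fun x => x)
  let m := PySem.List.pyGetD arr2 (PySem.Int.truncdiv ((arr2.length : Int) - 1) 2) 0
  let res : PySem.Dict Int Int :=
    (PySem.List.enumerate arr2).foldl (fun d p => d.insert p.1 |m - p.2|) PySem.Dict.empty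
  let res_dict := PySem.List.sorted2 res.items (fun y => -y.2) (fun y => -y.1)
  (PySem.List.pyRange 0 k).foldl
    (fun ans n => ans ++ [PySem.List.pyGetD arr2 (PySem.List.pyGetD res_dict n (0, 0)).1 0]) []

-- ===== PORT B =====
-- the two-pointer loop of Source B: `cnt` counts the remaining iterations of `for _ in range(k)`
def pvGoB (s : List Int) (m : Int) : Nat → Nat → Nat → List Int
  | _, _, 0 => []
  | l, r, cnt+1 =>
    if m - s.getD l 0 > s.getD r 0 - m then
      s.getD l 0 :: pvGoB s m (l+1) r cnt
    else
      s.getD r 0 :: pvGoB s m l (r-1) cnt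

def getStrongest_alt (arr : List Int) (k : Int) : List Int :=
  let s := PySem.List.sorted arr (fun x => x)
  let m := s.getD ((s.length - 1) / 2) 0
  pvGoB s m 0 (s.length - 1) k.toNat

-- ===== PRECONDITION & SPEC =====
-- Pre_ excludes exactly the inputs on which Python A raises IndexError:
-- the empty list (median lookup) and k > len(arr) (res_dict[n] lookup).
def Pre_getStrongest (arr : List Int) (k : Int) : Prop := arr ≠ [] ∧ k ≤ (arr.length : Int)
instance (arr : List Int) (k : Int) : Decidable (Pre_getStrongest arr k) := by
  unfold Pre_getStrongest; infer_instance
def pvWitness_getStrongest : List Int × Int := ([-7, 22, 17, 3], 2)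

def Spec_getStrongest (arr : List Int) (k : Int) (out : List Int) : Prop := out = getStrongest_alt arr k
instance (arr : List Int) (k : Int) (out : List Int) : Decidable (Spec_getStrongest arr k out) := by
  unfold Spec_getStrongest; infer_instance

-- ===== CLAIM (what is proved, stated in full; the proofs are below) =====
def Claim_equal_getStrongest : Prop := ∀ (arr : List Int) (k : Int), Dom_getStrongest arr k → Pre_getStrongest arr k → Spec_getStrongest arr k (getStrongest arr k)

-- ===== LEMMAS AND PROOFS =====

-- the ranking key of the task: strongest first = smallest key (distance to m negated, value negated)
def pvKey (m x : Int) : Lex (Int × Int) := toLex (-|m - x|, -x)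

def pvSeg (s : List Int) (l cnt : Nat) : List Int := (List.range' l cnt).map (fun i => s.getD i 0)

theorem pvKey_injective (m : Int) : Function.Injective (pvKey m) := by
  intro a b h
  have h2 := congrArg (fun p => (ofLex p).2) h
  simpa [pvKey] using h2

theorem pvGetD_mono {s : List Int} (hs : List.Pairwise (· ≤ ·) s) {i j : Nat}
    (hij : i ≤ j) (hj : j < s.length) : s.getD i 0 ≤ s.getD j 0 := by
  rcases eq_or_lt_of_le hij with rfl | hlt
  · exact le_refl _
  · have hi : i < s.length := lt_trans hlt hj
    rw [s.getD_eq_getElem 0 hi, s.getD_eq_getElem 0 hj]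
    exact List.pairwise_iff_getElem.mp hs i j hi hj hlt

theorem pvGoB_take (s : List Int) (m : Int) :
    ∀ (c c' l r : Nat), c ≤ c' → pvGoB s m l r c = List.take c (pvGoB s m l r c') := by
  intro c
  induction c with
  | zero => intro c' l r _; simp [pvGoB]
  | succ n ih =>
    intro c' l r h
    obtain ⟨c'', rfl⟩ : ∃ c'', c' = c'' + 1 := ⟨c' - 1, by omega⟩
    simp only [pvGoB]
    split
    · simp [ih c'' (l+1) r (by omega)]
    · simp [ih c'' l (r-1) (by omega)]

theorem pvSeg_mem {s : List Int} {l cnt : Nat} {x : Int} (h : x ∈ pvSeg s l cnt) :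
    ∃ i, l ≤ i ∧ i < l + cnt ∧ x = s.getD i 0 := by
  simp only [pvSeg, List.mem_map, List.mem_range'] at h
  obtain ⟨i, ⟨hi1, hi2⟩, rfl⟩ := h
  exact ⟨i, by omega, by omega, rfl⟩

-- every element of the segment is ≥ in key (i.e. weaker-or-tied) than the chosen end
theorem pvPick_left {s : List Int} (hs : List.Pairwise (· ≤ ·) s) {m : Int} {l r i : Nat}
    (hr : r < s.length) (hli : l ≤ i) (hir : i ≤ r)
    (hc : m - s.getD l 0 > s.getD r 0 - m) :
    pvKey m (s.getD l 0) ≤ pvKey m (s.getD i 0) := by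
  have hac : s.getD l 0 ≤ s.getD i 0 := pvGetD_mono hs hli (by omega)
  have hcb : s.getD i 0 ≤ s.getD r 0 := pvGetD_mono hs hir hr
  rw [pvKey, pvKey, Prod.Lex.toLex_le_toLex]
  simp only [Int.abs_eq_natAbs] at *
  omega

theorem pvPick_right {s : List Int} (hs : List.Pairwise (· ≤ ·) s) {m : Int} {l r i : Nat}
    (hr : r < s.length) (hli : l ≤ i) (hir : i ≤ r)
    (hc : ¬ m - s.getD l 0 > s.getD r 0 - m) :
    pvKey m (s.getD r 0) ≤ pvKey m (s.getD i 0) := by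
  have hal : s.getD l 0 ≤ s.getD i 0 := pvGetD_mono hs hli (by omega)
  have hcb : s.getD i 0 ≤ s.getD r 0 := pvGetD_mono hs hir hr
  rw [pvKey, pvKey, Prod.Lex.toLex_le_toLex]
  simp only [Int.abs_eq_natAbs] at *
  omega

theorem pvGoB_main (s : List Int) (m : Int) (hs : List.Pairwise (· ≤ ·) s) :
    ∀ (cnt l : Nat), l + cnt ≤ s.length →
      (pvGoB s m l (l + cnt - 1) cnt).Perm (pvSeg s l cnt) ∧
      List.Pairwise (fun a b => pvKey m a ≤ pvKey m b) (pvGoB s m l (l + cnt - 1) cnt) := by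
  intro cnt
  induction cnt with
  | zero =>
    intro l _
    exact ⟨by simp [pvGoB, pvSeg], by simp [pvGoB]⟩
  | succ n ih =>
    intro l h
    have hrw : l + (n + 1) - 1 = l + n := by omega
    rw [hrw]
    by_cases hc : m - s.getD l 0 > s.getD (l + n) 0 - m
    · have hgo : pvGoB s m l (l + n) (n + 1) = s.getD l 0 :: pvGoB s m (l + 1) (l + n) n := by
        simp only [pvGoB]; rw [if_pos hc]
      have ih' := ih (l + 1) (by omega)
      rw [show (l + 1) + n - 1 = l + n by omega] at ih'
      have hseg : pvSeg s l (n + 1) = s.getD l 0 :: pvSeg s (l + 1) n := by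
        simp [pvSeg, List.range'_succ]
      refine ⟨?_, ?_⟩
      · rw [hgo, hseg]; exact ih'.1.cons _
      · rw [hgo, List.pairwise_cons]
        refine ⟨?_, ih'.2⟩
        intro x hx
        obtain ⟨i, hi1, hi2, rfl⟩ := pvSeg_mem (ih'.1.mem_iff.mp hx)
        exact pvPick_left hs (by omega) (by omega) (by omega) hc
    · have hgo : pvGoB s m l (l + n) (n + 1) = s.getD (l + n) 0 :: pvGoB s m l (l + n - 1) n := by
        simp only [pvGoB]; rw [if_neg hc]
      have ih' := ih l (by omega)
      have hseg : pvSeg s l (n + 1) = pvSeg s l n ++ [s.getD (l + n) 0] := by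
        simp [pvSeg, List.range'_concat]
      refine ⟨?_, ?_⟩
      · rw [hgo, hseg]
        exact (ih'.1.cons _).trans (List.perm_append_singleton _ _).symm
      · rw [hgo, List.pairwise_cons]
        refine ⟨?_, ih'.2⟩
        intro x hx
        obtain ⟨i, hi1, hi2, rfl⟩ := pvSeg_mem (ih'.1.mem_iff.mp hx)
        exact pvPick_right hs (by omega) (by omega) (by omega) hc

theorem pvSeg_full (s : List Int) : pvSeg s 0 s.length = s := by
  apply List.ext_getElem
  · simp [pvSeg]
  · intro i h1 h2
    simp only [pvSeg, List.range'_eq_map_range, List.map_map, List.getElem_map,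
      List.getElem_range, Function.comp_apply, Nat.zero_add]
    rw [s.getD_eq_getElem 0 h2]

-- sorted2 with Int keys is sorted by the lexicographic pair key
theorem pvSorted2_eq {α : Type} (xs : List α) (k1 k2 : α → Int) :
    PySem.List.sorted2 xs k1 k2 = PySem.List.sorted xs (fun a => toLex (k1 a, k2 a)) := by
  have hb : (fun (a b : α) => decide (k1 a < k1 b) || (!decide (k1 b < k1 a) && decide (k2 a < k2 b)))
      = fun a b => decide (toLex (k1 a, k2 a) < toLex (k1 b, k2 b)) := by
    funext a b
    rcases lt_trichotomy (k1 a) (k1 b) with h | h | h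
    · simp [Prod.Lex.toLex_lt_toLex, h, lt_asymm h]
    · simp [Prod.Lex.toLex_lt_toLex, h]
    · simp [Prod.Lex.toLex_lt_toLex, h, lt_asymm h, ne_of_gt h]
  simp only [PySem.List.sorted2, PySem.List.sorted_eq_foldl_insertBy]
  rw [hb]
  simp

-- A's res dict: inserting along enumerate appends fresh keys
theorem pvItems (s : List Int) (m : Int) :
    ((PySem.List.enumerate s).foldl (fun d p => d.insert p.1 |m - p.2|)
        (PySem.Dict.empty : PySem.Dict Int Int)).items
      = (PySem.List.enumerate s).map (fun p => (p.1, |m - p.2|)) := by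
  have h := PySem.Dict.items_foldl_insert_fresh (PySem.List.enumerate s)
      (fun p => p.1) (fun p => |m - p.2|) (PySem.Dict.empty : PySem.Dict Int Int)
      (fun a _ => PySem.Dict.contains_empty _)
      (by
        have hp := PySem.List.pairwise_lt_enumerate s 0
        have : List.Pairwise (fun a b : Int => a ≠ b) ((PySem.List.enumerate s).map (fun p => p.1)) := by
          rw [List.pairwise_map]
          exact hp.imp (fun h => ne_of_lt h)
        exact this)
  simpa [PySem.Dict.empty] using h

-- reading back the values through the indices of enumerate gives the list itself
theorem pvEnumGet (s : List Int) :
    (PySem.List.enumerate s).map (fun p => PySem.List.pyGetD s p.1 0) = s := by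
  apply List.ext_getElem
  · simp [PySem.List.length_enumerate]
  · intro i h1 h2
    have hi : i < (PySem.List.enumerate s).length := by
      simpa [PySem.List.length_enumerate] using h2
    simp only [List.getElem_map, PySem.List.getElem_enumerate s 0 i hi]
    have : (0 : Int) + (i : Nat) = ((i : Nat) : Int) := by ring
    rw [this, PySem.List.pyGetD_natCast, s.getD_eq_getElem 0 h2]

-- mapping pyGetD over range(k) and post-processing with g is: take k, then map g
theorem pvRangeMapTake {α β : Type} (L : List α) (d : α) (g : α → β) (kz : Int)
    (h : kz.toNat ≤ L.length) :
    (PySem.List.pyRange 0 kz).map (fun n => g (PySem.List.pyGetD L n d))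
      = (L.take kz.toNat).map g := by
  by_cases hk : 0 ≤ kz
  · obtain ⟨kn, rfl⟩ : ∃ kn : Nat, kz = (kn : Int) := ⟨kz.toNat, (Int.toNat_of_nonneg hk).symm⟩
    rw [PySem.List.pyRange_zero_natCast, List.map_map]
    apply List.ext_getElem
    · simp only [List.length_map, List.length_range, List.length_take, Int.toNat_natCast]
      omega
    · intro i h1 h2
      have hik : i < kn := by simpa using h1
      have hiL : i < L.length := by simp at h; omega
      simp only [List.getElem_map, List.getElem_range, Function.comp_apply,
        PySem.List.pyGetD_natCast, List.getElem_take]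
      rw [L.getD_eq_getElem d hiL]
  · have h1 : PySem.List.pyRange 0 kz = [] := by
      apply List.eq_nil_iff_forall_not_mem.mpr
      intro x hx
      have := PySem.List.mem_pyRange_one.mp hx
      omega
    have h2 : kz.toNat = 0 := by omega
    simp [h1, h2]

theorem getStrongest_eq_take (arr : List Int) (k : Int) (h : Pre_getStrongest arr k) :
    getStrongest arr k =
      List.take k.toNat
        ((PySem.List.sorted2
            ((PySem.List.enumerate (PySem.List.sorted arr (fun x => x))).map
              (fun p => (p.1, |PySem.List.pyGetD (PySem.List.sorted arr (fun x => x))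
                (PySem.Int.truncdiv (((PySem.List.sorted arr (fun x => x)).length : Int) - 1) 2) 0 - p.2|)))
            (fun y => -y.2) (fun y => -y.1)).map
          (fun p => PySem.List.pyGetD (PySem.List.sorted arr (fun x => x)) p.1 0)) := by
  obtain ⟨hne, hk⟩ := h
  simp only [getStrongest, pvItems, PySem.List.foldl_append_singleton_eq_map, List.nil_append]
  have hlen : k.toNat ≤ (PySem.List.sorted2
      ((PySem.List.enumerate (PySem.List.sorted arr (fun x => x))).map
        (fun p => (p.1, |PySem.List.pyGetD (PySem.List.sorted arr (fun x => x))
          (PySem.Int.truncdiv (((PySem.List.sorted arr (fun x => x)).length : Int) - 1) 2) 0 - p.2|)))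
      (fun y => -y.2) (fun y => -y.1)).length := by
    rw [pvSorted2_eq]
    have h1 := (PySem.List.sorted_perm ((PySem.List.enumerate (PySem.List.sorted arr (fun x => x))).map
        (fun p => (p.1, |PySem.List.pyGetD (PySem.List.sorted arr (fun x => x))
          (PySem.Int.truncdiv (((PySem.List.sorted arr (fun x => x)).length : Int) - 1) 2) 0 - p.2|)))
        (fun y => toLex (-y.2, -y.1)) false).length_eq
    have h2 := (PySem.List.sorted_perm arr (fun x => x) false).length_eq
    rw [h1]
    simp only [List.length_map, PySem.List.length_enumerate, h2]
    exact Int.toNat_le.mpr hk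
  rw [pvRangeMapTake _ (0, 0)
    (fun p => PySem.List.pyGetD (PySem.List.sorted arr (fun x => x)) p.1 0) k hlen,
    List.map_take]

-- ===== VERDICT (by name: the statement is the Claim_ definition above) =====
theorem getStrongest_spec : Claim_equal_getStrongest := by
  unfold Claim_equal_getStrongest
  intro arr k _ hpre
  unfold Spec_getStrongest
  obtain ⟨hne, hk⟩ := hpre
  have hA := getStrongest_eq_take arr k ⟨hne, hk⟩
  set s := PySem.List.sorted arr (fun x => x) with hs_def
  have hlen : s.length = arr.length := (PySem.List.sorted_perm arr (fun x => x) false).length_eq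
  have hpos : 0 < s.length := by
    rw [hlen]; exact List.length_pos_iff.mpr hne
  have hsorted : List.Pairwise (· ≤ ·) s := by
    simpa using PySem.List.sorted_pairwise arr (fun x => x)
  have hkn : k.toNat ≤ s.length := by rw [hlen]; exact Int.toNat_le.mpr hk
  -- both ports read the same median value
  have hmidx : PySem.Int.truncdiv ((s.length : Int) - 1) 2 = (((s.length - 1) / 2 : Nat) : Int) := by
    have h1 : ((s.length : Int) - 1) = ((s.length - 1 : Nat) : Int) := by omega
    rw [PySem.Int.truncdiv, h1, Int.tdiv_eq_ediv_of_nonneg (by positivity)]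
    omega
  set mval := s.getD ((s.length - 1) / 2) 0 with hm_def
  have hmA : PySem.List.pyGetD s (PySem.Int.truncdiv ((s.length : Int) - 1) 2) 0 = mval := by
    rw [hmidx, PySem.List.pyGetD_natCast, hm_def]
  rw [hmA, pvSorted2_eq] at hA
  set items := (PySem.List.enumerate s).map (fun p => (p.1, |mval - p.2|)) with hitems_def
  set RD := PySem.List.sorted items (fun y => toLex (-y.2, -y.1)) with hRD_def
  set F : Int × Int → Int := fun p => PySem.List.pyGetD s p.1 0 with hF_def
  set LA := RD.map F with hLA_def
  have hRDperm : RD.Perm items := PySem.List.sorted_perm _ _ _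
  have hLAperm : LA.Perm s := by
    have h1 : (items.map F) = s := by
      rw [hitems_def, List.map_map]
      simpa [Function.comp, hF_def] using pvEnumGet s
    exact (hRDperm.map F).trans (h1 ▸ List.Perm.refl _)
  have hmem : ∀ p ∈ RD, ∃ j : Nat, j < s.length ∧ p = ((j : Int), |mval - s.getD j 0|) := by
    intro p hp
    have hpitems : p ∈ items := hRDperm.mem_iff.mp hp
    rw [hitems_def] at hpitems
    obtain ⟨q, hq, rfl⟩ := List.mem_map.mp hpitems
    obtain ⟨j, hjlt, rfl⟩ := (PySem.List.mem_enumerate_iff s 0 q).mp hq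
    refine ⟨j, hjlt, ?_⟩
    rw [s.getD_eq_getElem 0 hjlt]
    simp
  have hLApair : List.Pairwise (fun a b => pvKey mval a ≤ pvKey mval b) LA := by
    rw [hLA_def, List.pairwise_map]
    refine (PySem.List.sorted_pairwise items (fun y => toLex (-y.2, -y.1))).imp_of_mem ?_
    intro a b ha hb hle
    obtain ⟨j1, hj1, rfl⟩ := hmem a ha
    obtain ⟨j2, hj2, rfl⟩ := hmem b hb
    simp only [hF_def, PySem.List.pyGetD_natCast, pvKey]
    rw [Prod.Lex.toLex_le_toLex] at hle ⊢
    rcases hle with hlt | ⟨heq, hle2⟩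
    · left; exact hlt
    · right
      refine ⟨heq, ?_⟩
      have hj : j2 ≤ j1 := by omega
      have := pvGetD_mono hsorted hj hj1
      omega
  -- B's full run
  have hBfull := pvGoB_main s mval hsorted s.length 0 (by omega)
  simp only [Nat.zero_add] at hBfull
  have hGBperm : (pvGoB s mval 0 (s.length - 1) s.length).Perm s := by
    have := hBfull.1
    rwa [pvSeg_full] at this
  have hEq : LA = pvGoB s mval 0 (s.length - 1) s.length :=
    PySem.List.eq_of_perm_of_pairwise_le_of_injective (pvKey mval) (pvKey_injective mval)
      (hLAperm.trans hGBperm.symm) hLApair hBfull.2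
  have hB : getStrongest_alt arr k = pvGoB s mval 0 (s.length - 1) k.toNat := rfl
  rw [hB, hA, hEq, pvGoB_take s mval k.toNat s.length 0 (s.length - 1) hkn]
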